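-- pv_equiv track=rewrite | github.com/tyroneross/build-loop | scripts/version_advisor.py | infer_bump_kind
-- ===== SOURCE A (Python) =====
-- def infer_bump_kind(messages: list[str]) -> str:
--     kind = "patch"
--     for msg in messages:
--         head = msg.split(":", 1)[0].strip()
--         if "BREAKING CHANGE" in msg or head.endswith("!"):
--             return "major"
--         if head.startswith("feat") or head.startswith("feat("):
--             kind = "minor"
--     return kind
-- ===== SOURCE B (Python) =====
-- def infer_bump_kind(messages: list[str]) -> str:
--     def head(msg):
--         return msg.split(":", 1)[0].strip()
--     if any("BREAKING CHANGE" in m or head(m).endswith("!") for m in messages):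
--         return "major"
--     if any(head(m).startswith("feat") for m in messages):
--         return "minor"
--     return "patch"
-- ===== Notes on version B (the rewrite author's own statement) =====
-- stated objective: simpler
-- what changed: Replaced the single accumulator loop with early return by two stateless any() scans over a priority classification (major, then minor), dropping the redundant startswith('feat(') check subsumed by startswith('feat').
import Mathlib
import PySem

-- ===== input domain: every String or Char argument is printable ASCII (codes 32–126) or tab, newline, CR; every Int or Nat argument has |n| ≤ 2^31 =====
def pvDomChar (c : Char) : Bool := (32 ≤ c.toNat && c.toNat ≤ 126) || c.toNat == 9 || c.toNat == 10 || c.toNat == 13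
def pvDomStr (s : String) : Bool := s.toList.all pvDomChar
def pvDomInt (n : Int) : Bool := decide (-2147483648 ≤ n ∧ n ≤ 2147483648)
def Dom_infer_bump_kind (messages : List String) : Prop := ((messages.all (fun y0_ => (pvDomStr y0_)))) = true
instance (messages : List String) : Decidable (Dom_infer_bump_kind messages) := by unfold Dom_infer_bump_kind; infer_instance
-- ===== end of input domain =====

-- B classifies the result order-independently with two stateless any-scans (major, then minor) instead of A's accumulator loop with early return: simpler decomposition, same cost.


-- ===== PORT A =====
-- head = msg.split(":", 1)[0].strip()  (sep ":" ≠ "" so splitMax? is some; split always yields a nonempty list, [0] is its head)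
def pvHead (msg : String) : String :=
  PySem.Str.strip (((PySem.Str.splitMax? msg ":" 1).getD []).headD "")

def pvLoopA : List String → String → String
  | [], kind => kind
  | msg :: rest, kind =>
    let head := pvHead msg
    if PySem.Str.isIn "BREAKING CHANGE" msg || PySem.Str.endswith head "!" then "major"
    else if PySem.Str.startswith head "feat" || PySem.Str.startswith head "feat(" then
      pvLoopA rest "minor"
    else pvLoopA rest kind

def infer_bump_kind (messages : List String) : String :=
  pvLoopA messages "patch"

-- ===== PORT B =====
def pvIsMajor (msg : String) : Bool :=
  PySem.Str.isIn "BREAKING CHANGE" msg || PySem.Str.endswith (pvHead msg) "!"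

def pvIsFeat (msg : String) : Bool :=
  PySem.Str.startswith (pvHead msg) "feat"

def infer_bump_kind_alt (messages : List String) : String :=
  if messages.any pvIsMajor then "major"
  else if messages.any pvIsFeat then "minor"
  else "patch"

-- ===== PRECONDITION & SPEC =====
def Spec_infer_bump_kind (messages : List String) (out : String) : Prop := out = infer_bump_kind_alt messages
instance (messages : List String) (out : String) : Decidable (Spec_infer_bump_kind messages out) := by unfold Spec_infer_bump_kind; infer_instance

-- ===== CLAIM (what is proved, stated in full; the proofs are below) =====
def Claim_equal_infer_bump_kind : Prop := ∀ (messages : List String), Dom_infer_bump_kind messages → Spec_infer_bump_kind messages (infer_bump_kind messages)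

-- ===== LEMMAS AND PROOFS =====

-- startswith "feat(" is subsumed by startswith "feat"
theorem startswith_feat_paren (h : String) (hf : PySem.Str.startswith h "feat" = false) :
    PySem.Str.startswith h "feat(" = false := by
  by_contra hc
  rw [Bool.not_eq_false, PySem.Str.startswith_eq, PySem.Chars.startswith_iff] at hc
  rw [PySem.Str.startswith_eq] at hf
  have ht : PySem.Chars.startswith h.toList "feat".toList = true := by
    rw [PySem.Chars.startswith_iff]
    exact List.IsPrefix.trans (by decide) hc
  rw [ht] at hf
  exact absurd hf (by decide)

set_option maxHeartbeats 1000000 in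
theorem pvLoopA_char (msgs : List String) : ∀ kind : String,
    pvLoopA msgs kind =
      if msgs.any pvIsMajor then "major"
      else if msgs.any pvIsFeat then "minor"
      else kind := by
  induction msgs with
  | nil => intro kind; simp [pvLoopA]
  | cons msg rest ih =>
    intro kind
    simp only [pvLoopA, List.any_cons]
    have hMaj : pvIsMajor msg
        = (PySem.Str.isIn "BREAKING CHANGE" msg || PySem.Str.endswith (pvHead msg) "!") := rfl
    have hFt : pvIsFeat msg = PySem.Str.startswith (pvHead msg) "feat" := rfl
    cases hB : PySem.Str.isIn "BREAKING CHANGE" msg <;>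
      cases hE : PySem.Str.endswith (pvHead msg) "!" <;>
        cases hS : PySem.Str.startswith (pvHead msg) "feat" <;>
          simp only [hMaj, hFt, hB, hE, hS, Bool.true_or, Bool.false_or, Bool.or_true,
            Bool.or_false, reduceIte, ih]
    all_goals try rw [startswith_feat_paren _ hS]
    all_goals simp only [Bool.false_eq_true, if_false]
    all_goals split_ifs <;> rfl

-- ===== VERDICT (by name: the statement is the Claim_ definition above) =====
theorem infer_bump_kind_spec : Claim_equal_infer_bump_kind := by
  intro messages _
  unfold Spec_infer_bump_kind infer_bump_kind infer_bump_kind_alt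
  rw [pvLoopA_char]
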